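-- pv_equiv track=rewrite | github.com/aidsuu/penq-pennylane | lattice_geometry_utils.py | cubic_x_pairs
-- ===== SOURCE A (Python) =====
-- def cubic_site_index(x, y, z, Lx, Ly, Lz):
--     if Lx < 1 or Ly < 1 or Lz < 1:
--         raise ValueError("Lx, Ly, and Lz must be positive integers.")
--     if x < 0 or y < 0 or z < 0 or x >= Lx or y >= Ly or z >= Lz:
--         raise ValueError("cubic_site_index received out-of-range coordinates.")
--     return int(x + Lx * y + Lx * Ly * z)
--
-- def cubic_x_pairs(Lx, Ly, Lz):
--     if Lx < 1 or Ly < 1 or Lz < 1: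
--         raise ValueError("Lx, Ly, and Lz must be positive integers.")
--     pairs = []
--     for z in range(Lz):
--         for y in range(Ly):
--             for x in range(Lx - 1):
--                 left = cubic_site_index(x, y, z, Lx, Ly, Lz)
--                 right = cubic_site_index(x + 1, y, z, Lx, Ly, Lz)
--                 pairs.append((left, right))
--     return pairs
-- ===== SOURCE B (Python) =====
-- def cubic_x_pairs(Lx, Ly, Lz):
--     if Lx < 1 or Ly < 1 or Lz < 1:
--         raise ValueError("Lx, Ly, and Lz must be positive integers.")
--     pairs = []
--     for i in range(Lx * Ly * Lz):
--         if i % Lx != Lx - 1: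
--             pairs.append((i, i + 1))
--     return pairs
-- ===== Notes on version B (the rewrite author's own statement) =====
-- stated objective: simpler
-- what changed: Replaces the triple nested loop with its per-pair bounds-checking index helper by a single loop over the flat site index i in range(Lx*Ly*Lz), appending (i, i+1) exactly when i is not in the right boundary column (i % Lx != Lx-1).
import Mathlib
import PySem

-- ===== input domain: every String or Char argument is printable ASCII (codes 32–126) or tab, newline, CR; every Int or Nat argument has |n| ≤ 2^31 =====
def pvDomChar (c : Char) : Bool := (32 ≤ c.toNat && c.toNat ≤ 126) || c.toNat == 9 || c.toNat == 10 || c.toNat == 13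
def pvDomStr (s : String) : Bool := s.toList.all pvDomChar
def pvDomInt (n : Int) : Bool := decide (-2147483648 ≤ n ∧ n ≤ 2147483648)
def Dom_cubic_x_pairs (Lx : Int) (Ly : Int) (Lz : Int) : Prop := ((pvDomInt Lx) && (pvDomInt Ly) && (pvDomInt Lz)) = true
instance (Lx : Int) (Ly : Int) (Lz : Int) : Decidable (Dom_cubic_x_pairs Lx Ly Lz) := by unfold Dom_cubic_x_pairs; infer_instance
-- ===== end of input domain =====

-- B replaces A's triple nested loop + index helper by one loop over the flat
-- index with a modulo test (simpler decomposition, same asymptotic cost).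

-- ===== PORT A =====
-- helper cubic_site_index: returns none exactly where the Python raises ValueError
def cubic_site_index (x y z Lx Ly Lz : Int) : Option Int :=
  if Lx < 1 ∨ Ly < 1 ∨ Lz < 1 then none
  else if x < 0 ∨ y < 0 ∨ z < 0 ∨ x ≥ Lx ∨ y ≥ Ly ∨ z ≥ Lz then none
  else some (x + Lx * y + Lx * Ly * z)

def cubic_x_pairs (Lx : Int) (Ly : Int) (Lz : Int) : List (Int × Int) :=
  if Lx < 1 ∨ Ly < 1 ∨ Lz < 1 then []   -- Python raises ValueError here (outside Pre_)
  else
    (PySem.List.pyRange 0 Lz 1).foldl (fun pairs z =>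
      (PySem.List.pyRange 0 Ly 1).foldl (fun pairs y =>
        (PySem.List.pyRange 0 (Lx - 1) 1).foldl (fun pairs x =>
          match cubic_site_index x y z Lx Ly Lz, cubic_site_index (x + 1) y z Lx Ly Lz with
          | some left, some right => pairs ++ [(left, right)]
          | _, _ => pairs   -- unreachable: loop coordinates are always in range
        ) pairs) pairs) []

-- ===== PORT B =====
def cubic_x_pairs_alt (Lx : Int) (Ly : Int) (Lz : Int) : List (Int × Int) :=
  if Lx < 1 ∨ Ly < 1 ∨ Lz < 1 then []   -- Python raises ValueError here (outside Pre_)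
  else
    (PySem.List.pyRange 0 (Lx * Ly * Lz) 1).foldl (fun pairs i =>
      if PySem.Int.mod i Lx != Lx - 1 then pairs ++ [(i, i + 1)] else pairs) []

-- ===== PRECONDITION & SPEC =====
-- Pre_: exactly the inputs where Python A returns (it raises ValueError when any dimension < 1)
def Pre_cubic_x_pairs (Lx : Int) (Ly : Int) (Lz : Int) : Prop := 1 ≤ Lx ∧ 1 ≤ Ly ∧ 1 ≤ Lz
instance (Lx : Int) (Ly : Int) (Lz : Int) : Decidable (Pre_cubic_x_pairs Lx Ly Lz) := by
  unfold Pre_cubic_x_pairs; infer_instance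

def pvWitness_cubic_x_pairs : Int × Int × Int := (3, 2, 2)

def Spec_cubic_x_pairs (Lx : Int) (Ly : Int) (Lz : Int) (out : List (Int × Int)) : Prop :=
  out = cubic_x_pairs_alt Lx Ly Lz
instance (Lx : Int) (Ly : Int) (Lz : Int) (out : List (Int × Int)) : Decidable (Spec_cubic_x_pairs Lx Ly Lz out) := by
  unfold Spec_cubic_x_pairs; infer_instance

-- ===== CLAIM (what is proved, stated in full; the proofs are below) =====
def Claim_equal_cubic_x_pairs : Prop := ∀ (Lx : Int) (Ly : Int) (Lz : Int), Dom_cubic_x_pairs Lx Ly Lz → Pre_cubic_x_pairs Lx Ly Lz → Spec_cubic_x_pairs Lx Ly Lz (cubic_x_pairs Lx Ly Lz)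

-- ===== LEMMAS AND PROOFS =====

-- the pair contributed by flat site index n
def pvPair (n : Nat) : Int × Int := ((n : Int), (n : Int) + 1)

-- collapse the two outer loops (z then y) into one loop over k = y + b*z
lemma pv_collapse (b c : Nat) (h : Nat → List (Int × Int)) :
    (List.range c).flatMap (fun z => (List.range b).flatMap (fun y => h (y + b * z)))
      = (List.range (b * c)).flatMap h := by
  induction c with
  | zero => simp
  | succ c ih =>
      rw [List.range_succ, Nat.mul_succ, List.range_add]
      simp only [List.flatMap_append, ih, List.flatMap_singleton, List.flatMap_map]
      congr 1
      apply List.flatMap_congr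
      intro y _
      rw [Nat.add_comm]

-- the right-boundary filter on 0..a deletes exactly the last column
lemma pv_filter_range (a : Nat) (ha : 1 ≤ a) :
    (List.range a).filter (fun r => decide (r ≠ a - 1)) = List.range (a - 1) := by
  conv_lhs => rw [show a = (a - 1) + 1 from (Nat.succ_pred_eq_of_pos ha).symm, List.range_succ]
  rw [List.filter_append]
  simp only [List.filter_cons, List.filter_nil]
  rw [List.filter_eq_self.mpr (fun r hr => by simp only [List.mem_range] at hr; simp; omega)]
  simp

-- each block of a consecutive flat indices contributes exactly one row of pairs
lemma pv_block (a : Nat) (ha : 1 ≤ a) (m : Nat) :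
    ((List.range (a * m)).filter (fun i => decide (i % a ≠ a - 1))).map pvPair
      = (List.range m).flatMap (fun k => (List.range (a - 1)).map (fun x => pvPair (x + a * k))) := by
  induction m with
  | zero => simp
  | succ m ih =>
      rw [Nat.mul_succ, List.range_add, List.range_succ, List.filter_append, List.map_append,
        List.flatMap_append, ih, List.flatMap_singleton]
      congr 1
      rw [List.filter_map, List.map_map]
      rw [List.filter_congr (l := List.range a)
        (q := fun r => decide (r ≠ a - 1))
        (fun r hr => by
          simp only [List.mem_range] at hr
          simp only [Function.comp_apply, Nat.mul_add_mod, decide_eq_decide]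
          rw [Nat.mod_eq_of_lt hr])]
      rw [pv_filter_range a ha]
      apply List.map_congr_left
      intro x _
      simp [Function.comp, Nat.add_comm]

-- ===== VERDICT (by name: the statement is the Claim_ definition above) =====
theorem cubic_x_pairs_spec : Claim_equal_cubic_x_pairs := by
  intro Lx Ly Lz _ hpre
  obtain ⟨hx, hy, hz⟩ := hpre
  obtain ⟨a, rfl⟩ := Int.eq_ofNat_of_zero_le (by omega : (0:Int) ≤ Lx)
  obtain ⟨b, rfl⟩ := Int.eq_ofNat_of_zero_le (by omega : (0:Int) ≤ Ly)
  obtain ⟨c, rfl⟩ := Int.eq_ofNat_of_zero_le (by omega : (0:Int) ≤ Lz)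
  have ha : 1 ≤ a := by exact_mod_cast hx
  have hb : 1 ≤ b := by exact_mod_cast hy
  have hc : 1 ≤ c := by exact_mod_cast hz
  unfold Spec_cubic_x_pairs
  -- left side: A's triple nested loop as a nested flatMap over Nat ranges
  have hA : cubic_x_pairs (a:Int) (b:Int) (c:Int)
      = (List.range c).flatMap (fun z => (List.range b).flatMap (fun y =>
          (List.range (a-1)).map (fun x => pvPair (x + a * (y + b * z))))) := by
    unfold cubic_x_pairs
    rw [if_neg (by push Not; omega)]
    rw [show ((a:Int) - 1) = ((a - 1 : Nat) : Int) by omega]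
    simp only [PySem.List.pyRange_zero_nat, List.foldl_map]
    refine (PySem.List.foldl_congr_mem' _ _ (fun pairs z =>
        pairs ++ (List.range b).flatMap (fun y =>
          (List.range (a-1)).map (fun x => pvPair (x + a * (y + b * z))))) _ ?_).trans
      (by rw [PySem.List.foldl_append_eq_flatMap, List.nil_append])
    intro z hzm pairs
    simp only [List.mem_range] at hzm
    refine (PySem.List.foldl_congr_mem' _ _ (fun pairs y =>
        pairs ++ (List.range (a-1)).map (fun x => pvPair (x + a * (y + b * z)))) _ ?_).trans
      (PySem.List.foldl_append_eq_flatMap _ _ _)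
    intro y hym acc
    simp only [List.mem_range] at hym
    refine (PySem.List.foldl_congr_mem' _ _ (fun pairs x =>
        pairs ++ [pvPair (x + a * (y + b * z))]) _ ?_).trans
      (PySem.List.foldl_append_singleton_eq_map _ _ _)
    intro x hxm acc'
    simp only [List.mem_range] at hxm
    rw [show cubic_site_index (x:Int) (y:Int) (z:Int) (a:Int) (b:Int) (c:Int)
        = some ((x:Int) + (a:Int) * (y:Int) + (a:Int) * (b:Int) * (z:Int)) by
      unfold cubic_site_index
      rw [if_neg (by push Not; omega), if_neg (by push Not; omega)]]
    rw [show cubic_site_index ((x:Int)+1) (y:Int) (z:Int) (a:Int) (b:Int) (c:Int)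
        = some ((x:Int) + 1 + (a:Int) * (y:Int) + (a:Int) * (b:Int) * (z:Int)) by
      unfold cubic_site_index
      rw [if_neg (by push Not; omega), if_neg (by push Not; omega)]]
    simp only [pvPair]
    congr 2 <;> push_cast <;> ring
  -- right side: B's single filtered loop
  have hB : cubic_x_pairs_alt (a:Int) (b:Int) (c:Int)
      = ((List.range (a * (b * c))).filter (fun i => decide (i % a ≠ a - 1))).map pvPair := by
    unfold cubic_x_pairs_alt
    rw [if_neg (by push Not; omega)]
    rw [show ((a:Int) * (b:Int) * (c:Int)) = ((a * (b * c) : Nat) : Int) by push_cast; ring]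
    rw [PySem.List.pyRange_zero_nat, List.foldl_map]
    refine (PySem.List.foldl_congr_mem' _ _ (fun pairs (i : Nat) =>
        if decide (i % a ≠ a - 1) then pairs ++ [pvPair i] else pairs) _ ?_).trans
      (by rw [PySem.List.foldl_append_if, List.nil_append])
    intro i _ acc
    rw [PySem.Int.mod_natCast i a]
    have hcast : (((i % a : Nat) : Int) != (a:Int) - 1) = decide (i % a ≠ a - 1) := by
      rcases eq_or_ne (i % a) (a - 1) with h | h
      · simp [h, show ((a - 1 : Nat) : Int) = (a:Int) - 1 by omega]
      · have h1 : (((i % a : Nat) : Int) != (a:Int) - 1) = true := by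
          simp only [bne_iff_ne, ne_eq]
          omega
        have h2 : decide (i % a ≠ a - 1) = true := by simp [h]
        rw [h1, h2]
    rw [hcast]
    rfl
  rw [hA, hB, pv_block a ha (b * c), ← pv_collapse b c]
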